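-- pv_equiv track=rewrite | github.com/jeesy95-creator/hoho | algorithms/programmers/Lv2_250135_analog_clock/solution.py | solution_simulation
-- ===== SOURCE A (Python) =====
-- def solution_simulation(h1, m1, s1, h2, m2, s2):
--     t1 = h1 * 3600 + m1 * 60 + s1
--     t2 = h2 * 3600 + m2 * 60 + s2
--
--     ans = 0
--     for t in range(t1, t2 + 1):
--         if (59 * t) % 3600 == 0 or (719 * t) % 43200 == 0:
--             ans += 1
--     return ans
-- ===== SOURCE B (Python) =====
-- def solution_simulation(h1, m1, s1, h2, m2, s2):
--     # The hands coincide exactly at multiples of 3600 seconds (gcd(59,3600)=1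
--     # and gcd(719,43200)=1, and 3600 | 43200).  Find the first coincidence at
--     # or after the start, then count how many whole hours fit before the end.
--     start = h1 * 3600 + m1 * 60 + s1
--     end = h2 * 3600 + m2 * 60 + s2
--     first = -(-start // 3600) * 3600  # smallest multiple of 3600 >= start
--     if first > end:
--         return 0
--     return (end - first) // 3600 + 1
-- ===== Notes on version B (the rewrite author's own statement) =====
-- stated objective: simpler
-- what changed: B replaces A's per-second loop testing the OR-condition with arithmetic: the condition holds exactly at multiples of 3600, so B computes the first multiple of 3600 at or after the start by ceiling division and counts how many whole hours fit up to the end, in O(1).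
import Mathlib
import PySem

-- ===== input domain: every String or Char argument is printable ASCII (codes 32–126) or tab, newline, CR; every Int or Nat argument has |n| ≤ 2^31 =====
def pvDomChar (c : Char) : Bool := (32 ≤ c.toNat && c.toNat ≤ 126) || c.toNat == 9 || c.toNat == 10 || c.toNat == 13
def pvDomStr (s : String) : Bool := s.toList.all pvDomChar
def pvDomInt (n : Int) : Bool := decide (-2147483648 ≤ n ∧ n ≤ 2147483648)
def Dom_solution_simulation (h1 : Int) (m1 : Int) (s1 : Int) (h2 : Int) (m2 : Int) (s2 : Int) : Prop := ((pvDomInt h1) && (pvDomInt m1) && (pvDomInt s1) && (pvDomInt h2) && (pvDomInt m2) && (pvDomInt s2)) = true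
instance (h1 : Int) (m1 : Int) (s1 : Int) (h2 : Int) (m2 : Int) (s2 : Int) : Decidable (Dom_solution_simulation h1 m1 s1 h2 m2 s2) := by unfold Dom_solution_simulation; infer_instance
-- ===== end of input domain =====

-- B replaces A's per-second loop by locating the first multiple of 3600 at or
-- after the start via ceiling division and counting whole hours up to the end
-- (objective: simpler).

-- ===== PORT A =====
def solution_simulation (h1 : Int) (m1 : Int) (s1 : Int) (h2 : Int) (m2 : Int) (s2 : Int) : Int :=
  let t1 := h1 * 3600 + m1 * 60 + s1
  let t2 := h2 * 3600 + m2 * 60 + s2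
  (PySem.List.pyRange t1 (t2 + 1) 1).foldl
    (fun ans t =>
      if PySem.Int.mod (59 * t) 3600 = 0 ∨ PySem.Int.mod (719 * t) 43200 = 0 then ans + 1 else ans)
    0

-- ===== PORT B =====
def solution_simulation_alt (h1 : Int) (m1 : Int) (s1 : Int) (h2 : Int) (m2 : Int) (s2 : Int) : Int :=
  let start := h1 * 3600 + m1 * 60 + s1
  let stop := h2 * 3600 + m2 * 60 + s2
  let first := -(PySem.Int.floordiv (-start) 3600) * 3600
  if first > stop then 0
  else PySem.Int.floordiv (stop - first) 3600 + 1

-- ===== PRECONDITION & SPEC =====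
def Spec_solution_simulation (h1 : Int) (m1 : Int) (s1 : Int) (h2 : Int) (m2 : Int) (s2 : Int) (out : Int) : Prop := out = solution_simulation_alt h1 m1 s1 h2 m2 s2
instance (h1 : Int) (m1 : Int) (s1 : Int) (h2 : Int) (m2 : Int) (s2 : Int) (out : Int) : Decidable (Spec_solution_simulation h1 m1 s1 h2 m2 s2 out) := by unfold Spec_solution_simulation; infer_instance

-- ===== CLAIM =====
def Claim_equal_solution_simulation : Prop := ∀ (h1 : Int) (m1 : Int) (s1 : Int) (h2 : Int) (m2 : Int) (s2 : Int), Dom_solution_simulation h1 m1 s1 h2 m2 s2 → Spec_solution_simulation h1 m1 s1 h2 m2 s2 (solution_simulation h1 m1 s1 h2 m2 s2)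

-- ===== LEMMAS AND PROOFS =====

-- The loop body of A, as a named step function.
def pvStep (ans t : Int) : Int :=
  if PySem.Int.mod (59 * t) 3600 = 0 ∨ PySem.Int.mod (719 * t) 43200 = 0 then ans + 1 else ans

-- The closed-form count of multiples of 3600 in [a, b-1].
def pvCount (a b : Int) : Int :=
  if a < b then (b - 1) / 3600 - (a - 1) / 3600 else 0

-- A's loop condition is exactly "3600 divides t".
theorem pvStep_eq (ans t : Int) :
    pvStep ans t = if t % 3600 = 0 then ans + 1 else ans := by
  unfold pvStep
  rw [PySem.Int.mod_eq_emod_of_pos (by norm_num : (0:Int) < 3600),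
      PySem.Int.mod_eq_emod_of_pos (by norm_num : (0:Int) < 43200)]
  split_ifs <;> omega

-- One loop iteration peeled off the closed form.
theorem pvCount_succ (a b : Int) (h : a < b) :
    pvCount a b = (if a % 3600 = 0 then 1 else 0) + pvCount (a + 1) b := by
  unfold pvCount
  split_ifs <;> omega

-- Loop invariant: folding A's step over range(a, b) adds pvCount a b to the accumulator.
theorem pvFold_eq (n : Nat) : ∀ (a b acc : Int), (b - a).toNat = n →
    (PySem.List.pyRange a b 1).foldl pvStep acc = acc + pvCount a b := by
  induction n with
  | zero =>
    intro a b acc hn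
    have hba : b ≤ a := by omega
    rw [PySem.List.pyRange_one_eq_nil hba]
    simp only [List.foldl_nil, pvCount]
    rw [if_neg (by omega)]
    omega
  | succ k ih =>
    intro a b acc hn
    have hab : a < b := by omega
    rw [PySem.List.pyRange_one_cons hab]
    simp only [List.foldl_cons]
    rw [ih (a + 1) b (pvStep acc a) (by omega)]
    rw [pvStep_eq, pvCount_succ a b hab]
    by_cases hm : a % 3600 = 0 <;> simp [hm] <;> omega

-- ===== VERDICT =====
theorem solution_simulation_spec : Claim_equal_solution_simulation := by
  intro h1 m1 s1 h2 m2 s2 _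
  unfold Spec_solution_simulation solution_simulation solution_simulation_alt
  simp only []
  set t1 := h1 * 3600 + m1 * 60 + s1 with ht1
  set t2 := h2 * 3600 + m2 * 60 + s2 with ht2
  have hfold := pvFold_eq (t2 + 1 - t1).toNat t1 (t2 + 1) 0 rfl
  have hstep : (fun ans t =>
      if PySem.Int.mod (59 * t) 3600 = 0 ∨ PySem.Int.mod (719 * t) 43200 = 0 then ans + 1 else ans)
      = pvStep := rfl
  rw [hstep, hfold]
  rw [PySem.Int.floordiv_eq_ediv_of_pos (by norm_num : (0:Int) < 3600),
      PySem.Int.floordiv_eq_ediv_of_pos (by norm_num : (0:Int) < 3600)]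
  unfold pvCount
  by_cases hlt : t1 < t2 + 1
  · rw [if_pos hlt]
    split_ifs <;> omega
  · rw [if_neg hlt]
    split_ifs <;> omega
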